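-- pv_equiv track=rewrite | github.com/buckyos/buckyos | src/publish/make_local_deb.py | _replace_marked_block
-- ===== SOURCE A (Python) =====
-- from typing import Any, Dict, List
--
-- AUTO_BEGIN = "# BEGIN AUTO-GENERATED:"
--
-- AUTO_END = "# END AUTO-GENERATED:"
--
-- def _replace_marked_block(text: str, block_name: str, new_lines: List[str], indent: str = "") -> str:
--     begin = f"{AUTO_BEGIN} {block_name}"
--     end = f"{AUTO_END} {block_name}"
--     lines = text.splitlines()
--     try:
--         i0 = next(i for i, l in enumerate(lines) if l.strip() == begin)
--         i1 = next(i for i, l in enumerate(lines) if l.strip() == end and i > i0)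
--     except StopIteration:
--         appended = [begin] + [indent + l for l in new_lines] + [end]
--         return text.rstrip() + "\n" + "\n".join(appended) + "\n"
--
--     replaced = lines[: i0 + 1] + [indent + l for l in new_lines] + lines[i1:]
--     return "\n".join(replaced).rstrip("\n") + "\n"
-- ===== SOURCE B (Python) =====
-- from typing import List
--
-- AUTO_BEGIN = "# BEGIN AUTO-GENERATED:"
-- AUTO_END = "# END AUTO-GENERATED:"
--
-- def _replace_marked_block(text: str, block_name: str, new_lines: List[str], indent: str = "") -> str:
--     begin = f"{AUTO_BEGIN} {block_name}"
--     end = f"{AUTO_END} {block_name}"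
--     out = []
--     state = 0  # 0 = before block, 1 = inside block (skipping old body), 2 = after block
--     for l in text.splitlines():
--         if state == 0:
--             out.append(l)
--             if l.strip() == begin:
--                 out.extend(indent + x for x in new_lines)
--                 state = 1
--         elif state == 1:
--             if l.strip() == end:
--                 out.append(l)
--                 state = 2
--         else:
--             out.append(l)
--     if state != 2:
--         appended = [begin] + [indent + x for x in new_lines] + [end]
--         return text.rstrip() + "\n" + "\n".join(appended) + "\n"
--     return "\n".join(out).rstrip("\n") + "\n"
-- ===== Notes on version B (the rewrite author's own statement) =====
-- stated objective: alternative
-- what changed: B replaces A's two index-hunting generator scans over enumerate(lines) plus list slicing by a single linear state-machine pass (before/inside/after flags) over the lines, falling back to the same append path when no complete block is found.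
import Mathlib
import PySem

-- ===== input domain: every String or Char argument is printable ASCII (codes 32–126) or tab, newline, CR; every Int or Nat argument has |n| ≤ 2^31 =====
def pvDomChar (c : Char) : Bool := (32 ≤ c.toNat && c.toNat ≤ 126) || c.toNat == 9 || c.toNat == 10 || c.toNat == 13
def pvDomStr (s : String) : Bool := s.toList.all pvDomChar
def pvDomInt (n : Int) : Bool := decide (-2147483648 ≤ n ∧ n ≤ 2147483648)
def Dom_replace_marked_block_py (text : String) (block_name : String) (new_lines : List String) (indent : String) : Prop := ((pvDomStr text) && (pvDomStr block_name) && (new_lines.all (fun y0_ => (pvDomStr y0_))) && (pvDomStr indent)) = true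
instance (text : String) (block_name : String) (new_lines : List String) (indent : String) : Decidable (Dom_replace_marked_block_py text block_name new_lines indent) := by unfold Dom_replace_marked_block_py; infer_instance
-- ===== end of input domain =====

-- B replaces A's two index-hunting generator scans plus list slicing by one linear
-- state-machine pass over the lines (objective: alternative decomposition, same cost).

def pvAutoBegin : String := "# BEGIN AUTO-GENERATED:"
def pvAutoEnd : String := "# END AUTO-GENERATED:"

-- s.rstrip("\n") — hand port (PySem.Str.rstrip is the no-argument whitespace form); exact.
def pvRstripNl (s : String) : String :=
  String.ofList ((s.toList.reverse.dropWhile (fun c => c == '\n')).reverse)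

-- ===== PORT A =====
-- next(i for i, l in enumerate(lines) if l.strip() == begin): enumerate with an explicit counter
def pvFindBegin (b : String) (i : Nat) : List String → Option Nat
  | [] => none
  | l :: ls => if PySem.Str.strip l == b then some i else pvFindBegin b (i+1) ls

-- next(i for i, l in enumerate(lines) if l.strip() == end and i > i0)
def pvFindEnd (e : String) (i0 : Nat) (i : Nat) : List String → Option Nat
  | [] => none
  | l :: ls => if PySem.Str.strip l == e && decide (i0 < i) then some i else pvFindEnd e i0 (i+1) ls

def replace_marked_block_py (text : String) (block_name : String) (new_lines : List String) (indent : String) : String :=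
  let b := pvAutoBegin ++ " " ++ block_name
  let e := pvAutoEnd ++ " " ++ block_name
  let lines := PySem.Str.splitlines text
  match pvFindBegin b 0 lines with
  | none =>
      PySem.Str.rstrip text ++ "\n" ++
        PySem.Str.join "\n" ([b] ++ new_lines.map (fun l => indent ++ l) ++ [e]) ++ "\n"
  | some i0 =>
      match pvFindEnd e i0 0 lines with
      | none =>
          PySem.Str.rstrip text ++ "\n" ++
            PySem.Str.join "\n" ([b] ++ new_lines.map (fun l => indent ++ l) ++ [e]) ++ "\n"
      | some i1 =>
          let replaced := PySem.List.slice lines none (some ((i0 : Int) + 1)) ++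
            new_lines.map (fun l => indent ++ l) ++ PySem.List.slice lines (some (i1 : Int)) none
          pvRstripNl (PySem.Str.join "\n" replaced) ++ "\n"

-- ===== PORT B =====
-- the for-loop of Source B: accumulator (out, state); state 0 = before, 1 = inside, 2 = after
def pvLoopB (b e : String) (ins : List String) : List String → List String × Nat → List String × Nat
  | [], acc => acc
  | l :: ls, (out, state) =>
      if state = 0 then
        if PySem.Str.strip l == b then pvLoopB b e ins ls (out ++ [l] ++ ins, 1)
        else pvLoopB b e ins ls (out ++ [l], 0)
      else if state = 1 then
        if PySem.Str.strip l == e then pvLoopB b e ins ls (out ++ [l], 2)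
        else pvLoopB b e ins ls (out, 1)
      else pvLoopB b e ins ls (out ++ [l], 2)

def replace_marked_block_py_alt (text : String) (block_name : String) (new_lines : List String) (indent : String) : String :=
  let b := pvAutoBegin ++ " " ++ block_name
  let e := pvAutoEnd ++ " " ++ block_name
  let res := pvLoopB b e (new_lines.map (fun x => indent ++ x)) (PySem.Str.splitlines text) ([], 0)
  if res.2 ≠ 2 then
    PySem.Str.rstrip text ++ "\n" ++
      PySem.Str.join "\n" ([b] ++ new_lines.map (fun x => indent ++ x) ++ [e]) ++ "\n"
  else
    pvRstripNl (PySem.Str.join "\n" res.1) ++ "\n"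

-- ===== PRECONDITION & SPEC =====
def Spec_replace_marked_block_py (text : String) (block_name : String) (new_lines : List String) (indent : String) (out : String) : Prop := out = replace_marked_block_py_alt text block_name new_lines indent
instance (text : String) (block_name : String) (new_lines : List String) (indent : String) (out : String) : Decidable (Spec_replace_marked_block_py text block_name new_lines indent out) := by unfold Spec_replace_marked_block_py; infer_instance

-- ===== CLAIM (what is proved, stated in full; the proofs are below) =====
def Claim_equal_replace_marked_block_py : Prop := ∀ (text : String) (block_name : String) (new_lines : List String) (indent : String), Dom_replace_marked_block_py text block_name new_lines indent → Spec_replace_marked_block_py text block_name new_lines indent (replace_marked_block_py text block_name new_lines indent)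

-- ===== LEMMAS AND PROOFS =====

theorem pvFindBegin_none {b : String} : ∀ (ls : List String) (i : Nat),
    pvFindBegin b i ls = none → ∀ l ∈ ls, (PySem.Str.strip l == b) = false := by
  intro ls
  induction ls with
  | nil => intro i _ l hl; cases hl
  | cons x xs ih =>
      intro i h l hl
      simp only [pvFindBegin] at h
      by_cases hx : (PySem.Str.strip x == b) = true
      · simp [hx] at h
      · rcases List.mem_cons.mp hl with rfl | hl
        · simpa using hx
        · exact ih (i+1) (by simpa [hx] using h) l hl

theorem pvFindBegin_some {b : String} : ∀ (ls : List String) (i j : Nat),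
    pvFindBegin b i ls = some j →
    ∃ pre lb post, ls = pre ++ lb :: post ∧ j = i + pre.length ∧
      (PySem.Str.strip lb == b) = true ∧ ∀ x ∈ pre, (PySem.Str.strip x == b) = false := by
  intro ls
  induction ls with
  | nil => intro i j h; simp [pvFindBegin] at h
  | cons x xs ih =>
      intro i j h
      simp only [pvFindBegin] at h
      by_cases hx : (PySem.Str.strip x == b) = true
      · refine ⟨[], x, xs, rfl, ?_, hx, by simp⟩
        simp [hx] at h
        simp only [List.length_nil]
        omega
      · obtain ⟨pre, lb, post, hsplit, hj, hlb, hpre⟩ := ih (i+1) j (by simpa [hx] using h)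
        refine ⟨x :: pre, lb, post, by simp [hsplit],
          by simp only [hj, List.length_cons]; omega, hlb, ?_⟩
        intro y hy
        rcases List.mem_cons.mp hy with rfl | hy
        · simpa using hx
        · exact hpre y hy

theorem pvFindEnd_skip {e : String} {i0 : Nat} : ∀ (ls rest : List String) (i : Nat),
    i + ls.length ≤ i0 + 1 → pvFindEnd e i0 i (ls ++ rest) = pvFindEnd e i0 (i + ls.length) rest := by
  intro ls
  induction ls with
  | nil => intro rest i _; simp
  | cons x xs ih =>
      intro rest i h
      have hi : ¬ i0 < i := by simp only [List.length_cons] at h; omega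
      simp only [List.cons_append, pvFindEnd]
      rw [if_neg (show ¬ (PySem.Str.strip x == e && decide (i0 < i)) = true by simp [hi])]
      have hih := ih rest (i+1) (by simp only [List.length_cons] at h ⊢; omega)
      rw [hih]
      congr 1
      simp only [List.length_cons]
      omega

theorem pvFindEnd_none {e : String} {i0 : Nat} : ∀ (ls : List String) (i : Nat), i0 < i →
    pvFindEnd e i0 i ls = none → ∀ l ∈ ls, (PySem.Str.strip l == e) = false := by
  intro ls
  induction ls with
  | nil => intro i _ _ l hl; cases hl
  | cons x xs ih =>
      intro i hi h l hl
      simp only [pvFindEnd, hi, decide_true, Bool.and_true] at h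
      by_cases hx : (PySem.Str.strip x == e) = true
      · simp [hx] at h
      · rcases List.mem_cons.mp hl with rfl | hl
        · simpa using hx
        · exact ih (i+1) (by omega) (by simpa [hx] using h) l hl

theorem pvFindEnd_some {e : String} {i0 : Nat} : ∀ (ls : List String) (i j : Nat), i0 < i →
    pvFindEnd e i0 i ls = some j →
    ∃ mid le tail, ls = mid ++ le :: tail ∧ j = i + mid.length ∧
      (PySem.Str.strip le == e) = true ∧ ∀ x ∈ mid, (PySem.Str.strip x == e) = false := by
  intro ls
  induction ls with
  | nil => intro i j _ h; simp [pvFindEnd] at h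
  | cons x xs ih =>
      intro i j hi h
      simp only [pvFindEnd, hi, decide_true, Bool.and_true] at h
      by_cases hx : (PySem.Str.strip x == e) = true
      · refine ⟨[], x, xs, rfl, ?_, hx, by simp⟩
        simp [hx] at h
        simp only [List.length_nil]
        omega
      · obtain ⟨mid, le, tail, hsplit, hj, hle, hmid⟩ := ih (i+1) j (by omega) (by simpa [hx] using h)
        refine ⟨x :: mid, le, tail, by simp [hsplit],
          by simp only [hj, List.length_cons]; omega, hle, ?_⟩
        intro y hy
        rcases List.mem_cons.mp hy with rfl | hy
        · simpa using hx
        · exact hmid y hy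

theorem pvLoopB_state0_prefix {b e : String} {ins : List String} :
    ∀ (pre rest : List String) (out : List String),
    (∀ l ∈ pre, (PySem.Str.strip l == b) = false) →
    pvLoopB b e ins (pre ++ rest) (out, 0) = pvLoopB b e ins rest (out ++ pre, 0) := by
  intro pre
  induction pre with
  | nil => intro rest out _; simp
  | cons x xs ih =>
      intro rest out h
      have hx : (PySem.Str.strip x == b) = false := h x (List.mem_cons_self ..)
      simp only [List.cons_append, pvLoopB]
      rw [if_pos trivial,
        if_neg (show ¬ (PySem.Str.strip x == b) = true by simp [hx])]
      rw [ih rest (out ++ [x]) (fun l hl => h l (List.mem_cons_of_mem _ hl))]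
      simp

theorem pvLoopB_state1_prefix {b e : String} {ins : List String} :
    ∀ (mid rest : List String) (out : List String),
    (∀ l ∈ mid, (PySem.Str.strip l == e) = false) →
    pvLoopB b e ins (mid ++ rest) (out, 1) = pvLoopB b e ins rest (out, 1) := by
  intro mid
  induction mid with
  | nil => intro rest out _; simp
  | cons x xs ih =>
      intro rest out h
      have hx : (PySem.Str.strip x == e) = false := h x (List.mem_cons_self ..)
      simp only [List.cons_append, pvLoopB]
      rw [if_pos trivial,
        if_neg (show ¬ (PySem.Str.strip x == e) = true by simp [hx])]
      exact ih rest out (fun l hl => h l (List.mem_cons_of_mem _ hl))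

theorem pvLoopB_state2 {b e : String} {ins : List String} :
    ∀ (ls : List String) (out : List String),
    pvLoopB b e ins ls (out, 2) = (out ++ ls, 2) := by
  intro ls
  induction ls with
  | nil => intro out; simp [pvLoopB]
  | cons x xs ih =>
      intro out
      simp only [pvLoopB]
      rw [ih (out ++ [x])]
      simp

-- the two ports as a function of the split lines and the shared fallback string
theorem pvCore (b e : String) (ins : List String) (lines : List String) (fb : String) :
    (match pvFindBegin b 0 lines with
     | none => fb
     | some i0 =>
         match pvFindEnd e i0 0 lines with
         | none => fb
         | some i1 =>
             pvRstripNl (PySem.Str.join "\n" (PySem.List.slice lines none (some ((i0 : Int) + 1)) ++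
               ins ++ PySem.List.slice lines (some (i1 : Int)) none)) ++ "\n") =
    (if (pvLoopB b e ins lines ([], 0)).2 ≠ 2 then fb
     else pvRstripNl (PySem.Str.join "\n" (pvLoopB b e ins lines ([], 0)).1) ++ "\n") := by
  cases hfb : pvFindBegin b 0 lines with
  | none =>
      have hB : pvLoopB b e ins lines ([], 0) = (lines, 0) := by
        have h := pvLoopB_state0_prefix (b := b) (e := e) (ins := ins) lines [] []
          (pvFindBegin_none lines 0 hfb)
        simpa [pvLoopB] using h
      rw [hB]
      simp
  | some i0 =>
      obtain ⟨pre, lb, post, hsplit, hi0, hlb, hpre⟩ := pvFindBegin_some lines 0 i0 hfb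
      simp only [Nat.zero_add] at hi0
      cases hfe : pvFindEnd e i0 0 lines with
      | none =>
          have hfe' : pvFindEnd e i0 (i0 + 1) post = none := by
            have hskip := pvFindEnd_skip (e := e) (i0 := i0) (pre ++ [lb]) post 0
              (by simp [hi0])
            rw [hsplit, show pre ++ lb :: post = (pre ++ [lb]) ++ post by simp, hskip] at hfe
            simpa [hi0] using hfe
          have hB : pvLoopB b e ins lines ([], 0) = (pre ++ [lb] ++ ins, 1) := by
            rw [hsplit, pvLoopB_state0_prefix pre (lb :: post) [] hpre, List.nil_append]
            simp only [pvLoopB]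
            rw [if_pos trivial, if_pos hlb]
            have h1 := pvLoopB_state1_prefix (b := b) (e := e) (ins := ins) post []
              (pre ++ [lb] ++ ins) (pvFindEnd_none post (i0+1) (by omega) hfe')
            simpa [pvLoopB] using h1
          rw [hB]
          simp [hfe]
      | some i1 =>
          have hfe' : pvFindEnd e i0 (i0 + 1) post = some i1 := by
            have hskip := pvFindEnd_skip (e := e) (i0 := i0) (pre ++ [lb]) post 0
              (by simp [hi0])
            rw [hsplit, show pre ++ lb :: post = (pre ++ [lb]) ++ post by simp, hskip] at hfe
            simpa [hi0] using hfe
          obtain ⟨mid, le, tail, hpost, hi1, hle, hmid⟩ :=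
            pvFindEnd_some post (i0+1) i1 (by omega) hfe'
          have hB : pvLoopB b e ins lines ([], 0) =
              (pre ++ [lb] ++ ins ++ [le] ++ tail, 2) := by
            rw [hsplit, pvLoopB_state0_prefix pre (lb :: post) [] hpre, List.nil_append]
            simp only [pvLoopB]
            rw [if_pos trivial, if_pos hlb]
            rw [hpost, pvLoopB_state1_prefix mid (le :: tail) _ hmid]
            simp only [pvLoopB]
            rw [if_pos trivial, if_pos hle]
            rw [pvLoopB_state2 tail _]
            simp
          rw [hB]
          simp only [hfe]
          rw [PySem.List.slice_to lines (b := (i0 : Int) + 1) (by omega),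
            PySem.List.slice_from lines (a := (i1 : Int)) (by omega)]
          have htoNat1 : ((i0 : Int) + 1).toNat = pre.length + 1 := by omega
          have htoNat2 : ((i1 : Int)).toNat = pre.length + 1 + mid.length := by omega
          have htake : lines.take (pre.length + 1) = pre ++ [lb] := by
            have hlen : pre.length + 1 = (pre ++ [lb]).length := by simp
            rw [hsplit, show pre ++ lb :: post = (pre ++ [lb]) ++ post by simp, hlen,
              List.take_left]
          have hdrop : lines.drop (pre.length + 1 + mid.length) = le :: tail := by
            have hlen : pre.length + 1 + mid.length = (pre ++ lb :: mid).length := by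
              simp only [List.length_append, List.length_cons]; omega
            rw [hsplit, hpost,
              show pre ++ lb :: (mid ++ le :: tail) = (pre ++ lb :: mid) ++ (le :: tail) by simp,
              hlen, List.drop_left]
          rw [htoNat1, htoNat2, htake, hdrop]
          simp [List.append_assoc]

-- ===== VERDICT (by name: the statement is the Claim_ definition above) =====
theorem replace_marked_block_py_spec : Claim_equal_replace_marked_block_py := by
  intro text block_name new_lines indent _
  unfold Spec_replace_marked_block_py replace_marked_block_py replace_marked_block_py_alt
  exact pvCore _ _ _ _ _
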